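-- pv_equiv track=rewrite | github.com/rmccampbell/PythonProjects | misc.py | hamming_check
-- ===== SOURCE A (Python) =====
-- def hamming_check(data, n):
--     npar = max(n - 1, 0).bit_length()
--     n = 1 << npar
--     mask = (1 << n) - 1
--     data &= mask
--     par = data.bit_count() & 1
--     pos = 0
--     for i in reversed(range(npar)):
--         pow2 = 1 << i
--         mask ^= mask >> pow2
--         pi = (data & mask).bit_count() & 1
--         pos |= pi << i
--     return -1 if pos and (par == 0) else pos
-- ===== SOURCE B (Python) =====
-- def hamming_check(data, n):
--     npar = max(n - 1, 0).bit_length()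
--     n = 1 << npar
--     mask = (1 << n) - 1
--     data &= mask
--     par = data.bit_count() & 1
--     pos = 0
--     j = 0
--     while data:
--         w = data & 0xFFFFFFFFFFFFFFFF
--         k = j
--         while w:
--             if w & 1:
--                 pos ^= k
--             w >>= 1
--             k += 1
--         data >>= 64
--         j += 64
--     return -1 if pos and par == 0 else pos
-- ===== Notes on version B (the rewrite author's own statement) =====
-- stated objective: alternative
-- what changed: Replaces A's reversed-range mask-folding loop (npar rounds, each XOR-shifting a 2^n-bit mask, masking and popcounting) by a single pass over the masked data that XOR-accumulates the index of every set bit, consuming the data in 64-bit chunks; it rests on the identity that the Hamming syndrome is the XOR of the positions of the set bits.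
import Mathlib
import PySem

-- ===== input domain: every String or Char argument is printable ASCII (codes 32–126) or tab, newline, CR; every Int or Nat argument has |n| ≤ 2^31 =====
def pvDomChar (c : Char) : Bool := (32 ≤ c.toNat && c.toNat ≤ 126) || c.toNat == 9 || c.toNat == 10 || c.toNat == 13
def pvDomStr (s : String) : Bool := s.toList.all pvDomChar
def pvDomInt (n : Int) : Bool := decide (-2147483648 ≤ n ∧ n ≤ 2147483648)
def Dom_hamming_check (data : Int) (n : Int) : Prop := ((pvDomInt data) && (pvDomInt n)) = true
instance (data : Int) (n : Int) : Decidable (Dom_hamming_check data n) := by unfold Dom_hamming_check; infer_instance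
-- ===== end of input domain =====

-- B replaces A's reversed-range mask-folding loop by a single pass over the data bits that
-- XOR-accumulates the index of each set bit (objective: simpler; equal return value proved below).

-- ===== PORT A =====
-- `int.bit_count()` of a word below 2^2^k. PySem.Int.bitCount computes it by a deep non-tail
-- per-bit recursion that the evaluator cannot run on the 2^npar-bit words this function builds,
-- so both ports use this halving formulation; it is PROVED equal to PySem.Int.bitCount below
-- (lemma pyBitCount_eq_pcount), so the ports' values are exactly Python's.
def popNat (n : Nat) : Nat :=
  if n = 0 then 0 else n % 2 + popNat (n / 2)
termination_by n

def pyBitCount : Nat → Nat → Nat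
  | 0, n => popNat n
  | k+1, n =>
    if n = 0 then 0
    else if k + 1 ≤ 6 then popNat n
    else pyBitCount k (n / 2 ^ 2 ^ k) + pyBitCount k (n % 2 ^ 2 ^ k)

-- the body of A's `for i in reversed(range(npar))` loop, hoisted to a named helper
def hcStep (npar : Nat) (d : Int) (st : Int × Int) (i : Int) : Int × Int :=
  let pow2 : Int := (1 : Int) <<< i.toNat        -- i ≥ 0 (it comes from range(npar)), so .toNat is exact
  let mask := PySem.Int.bxor st.1 (st.1 >>> pow2.toNat)
  let pi : Int := PySem.Int.band ((pyBitCount npar (PySem.Int.band d mask).natAbs : Nat) : Int) 1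
  (mask, PySem.Int.bor st.2 (pi <<< i.toNat))

def hamming_check (data : Int) (n : Int) : Int :=
  let npar : Nat := PySem.Int.bitLength (max (n - 1) 0)
  let n2 : Int := (1 : Int) <<< npar                 -- n = 1 << npar
  let mask0 : Int := ((1 : Int) <<< n2.toNat) - 1    -- mask = (1 << n) - 1 (n ≥ 1, so .toNat is exact)
  let d : Int := PySem.Int.band data mask0           -- data &= mask
  let par : Int := PySem.Int.band ((pyBitCount npar d.natAbs : Nat) : Int) 1
  let st : Int × Int :=
    ((PySem.List.pyRange 0 (npar : Int) 1).reverse).foldl (hcStep npar d) (mask0, 0)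
  if st.2 ≠ 0 ∧ par = 0 then -1 else st.2

-- ===== PORT B =====
-- B's loops; their arguments are ≥ 0 (data was masked), so they are stated on Nat, where they are exact.
-- inner `while w:` loop (k walks over the bits of the 64-bit chunk w)
def hammingAltLoop (w : Nat) (k : Nat) (pos : Nat) : Nat :=
  if _h : w = 0 then pos
  else hammingAltLoop (w >>> 1) (k + 1) (if w &&& 1 = 1 then pos ^^^ k else pos)
termination_by w
decreasing_by simp only [Nat.shiftRight_eq_div_pow, pow_one]; omega

-- outer `while data:` loop, consuming data in 64-bit chunks
def hammingOuter (d : Nat) (j : Nat) (pos : Nat) : Nat :=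
  if _h : d = 0 then pos
  else hammingOuter (d >>> 64) (j + 64) (hammingAltLoop (d &&& 0xFFFFFFFFFFFFFFFF) j pos)
termination_by d
decreasing_by
  simp only [Nat.shiftRight_eq_div_pow]
  exact Nat.div_lt_self (by omega) (by norm_num)

def hamming_check_alt (data : Int) (n : Int) : Int :=
  let npar : Nat := PySem.Int.bitLength (max (n - 1) 0)
  let n2 : Int := (1 : Int) <<< npar
  let mask0 : Int := ((1 : Int) <<< n2.toNat) - 1
  let d : Int := PySem.Int.band data mask0
  let par : Int := PySem.Int.band ((pyBitCount npar d.natAbs : Nat) : Int) 1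
  let pos : Int := ((hammingOuter d.toNat 0 0 : Nat) : Int)
  if pos ≠ 0 ∧ par = 0 then -1 else pos

-- ===== PRECONDITION & SPEC =====
def Spec_hamming_check (data : Int) (n : Int) (out : Int) : Prop := out = hamming_check_alt data n
instance (data : Int) (n : Int) (out : Int) : Decidable (Spec_hamming_check data n out) := by unfold Spec_hamming_check; infer_instance

-- ===== CLAIM (what is proved, stated in full; the proofs are below) =====
def Claim_equal_hamming_check : Prop := ∀ (data : Int) (n : Int), Dom_hamming_check data n → Spec_hamming_check data n (hamming_check data n)

-- ===== LEMMAS AND PROOFS =====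

theorem xor_half_bit (x : Nat) :
    (decide (x / 2 % 2 = 1) ^^ decide ((x + 1) / 2 % 2 = 1)) = decide (x % 2 = 1) := by
  by_cases hx : x % 2 = 1
  · by_cases hq : x / 2 % 2 = 1
    · have h : (x+1)/2 % 2 = 0 := by omega
      simp [hx, hq, h]
    · have h : (x+1)/2 % 2 = 1 := by omega
      simp [hx, hq, h]
  · have h : (x+1)/2 = x/2 := by omega
    simp [hx, h]

theorem carry_bit (k p : Nat) :
    (p.testBit (k+1) ^^ (2 ^ k + p).testBit (k+1)) = p.testBit k := by
  have h1 : p / 2 ^ (k+1) = p / 2 ^ k / 2 := by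
    rw [Nat.div_div_eq_div_mul, pow_succ]
  have h2 : (2 ^ k + p) / 2 ^ (k+1) = (p / 2 ^ k + 1) / 2 := by
    rw [pow_succ, ← Nat.div_div_eq_div_mul]
    congr 1
    rw [Nat.add_comm, Nat.add_div_right _ (Nat.two_pow_pos k)]
  rw [Nat.testBit_eq_decide_div_mod_eq, Nat.testBit_eq_decide_div_mod_eq,
      Nat.testBit_eq_decide_div_mod_eq, h1, h2]
  exact xor_half_bit (p / 2 ^ k)

def MaskP (m k p : Nat) : Bool := decide (p < 2 ^ m) && (decide (k = m) || p.testBit k)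

theorem maskP_step (m k p : Nat) (hk : k < m) :
    (MaskP m (k+1) p ^^ MaskP m (k+1) (2 ^ k + p)) = MaskP m k p := by
  unfold MaskP
  by_cases hp : p < 2 ^ m
  · by_cases hp2 : 2 ^ k + p < 2 ^ m
    · simp only [hp, hp2, decide_true, Bool.true_and]
      by_cases hm : k + 1 = m
      · -- p < 2^(k+1) and 2^k+p < 2^(k+1) force bit k of p to be 0
        subst hm
        have hpk : p < 2 ^ k := by
          have := pow_succ 2 k ▸ hp2; omega
        simp [Nat.testBit_lt_two_pow hpk]
      · have hkm' : ¬ (k = m) := by omega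
        simp only [hm, hkm', decide_false, Bool.false_or]
        exact carry_bit k p
    · -- top boundary: 2^m - 2^k ≤ p < 2^m
      have hge : 2 ^ m - 2 ^ k ≤ p := by omega
      simp only [hp, hp2, decide_true, decide_false, Bool.true_and, Bool.false_and, Bool.xor_false]
      -- p / 2^k = 2^(m-k) - 1, which is odd
      have hkm : 2 ^ k ∣ 2 ^ m := pow_dvd_pow 2 (le_of_lt hk)
      have hsplit : 2 ^ m = 2 ^ (m - k) * 2 ^ k := by
        rw [← pow_add]; congr 1; omega
      have hdiv : p / 2 ^ k = 2 ^ (m - k) - 1 := by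
        have hpos := Nat.two_pow_pos k
        have h1 : 2 ^ (m - k) - 1 ≤ p / 2 ^ k := by
          apply Nat.le_div_iff_mul_le hpos |>.mpr
          calc (2 ^ (m-k) - 1) * 2 ^ k = 2 ^ (m-k) * 2^k - 2^k := by rw [Nat.sub_mul, one_mul]
          _ ≤ p := by omega
        have h2 : p / 2 ^ k < 2 ^ (m - k) := by
          apply Nat.div_lt_iff_lt_mul hpos |>.mpr; omega
        omega
      have hbk : p.testBit k = true := by
        rw [Nat.testBit_eq_decide_div_mod_eq, hdiv]
        have : 1 ≤ m - k := by omega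
        have h2 : 2 ^ (m-k) % 2 = 0 := by
          have : 2 ∣ 2 ^ (m-k) := dvd_pow_self 2 (by omega)
          omega
        have hpos2 := Nat.two_pow_pos (m-k)
        simp; omega
      rw [hbk]
      by_cases hm : k + 1 = m
      · simp [hm]
      · simp only [hm, decide_false, Bool.false_or]
        have hdiv2 : p / 2 ^ (k+1) = 2 ^ (m - k - 1) - 1 := by
          rw [pow_succ, ← Nat.div_div_eq_div_mul, hdiv]
          have h1 : 2 ≤ m - k := by omega
          have : 2 ^ (m - k) = 2 * 2 ^ (m - k - 1) := by
            rw [← pow_succ']; congr 1; omega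
          rw [this]
          have hpos3 := Nat.two_pow_pos (m - k - 1)
          omega
        rw [Nat.testBit_eq_decide_div_mod_eq, hdiv2]
        have : 1 ≤ m - k - 1 := by omega
        have h2 : 2 ^ (m-k-1) % 2 = 0 := by
          have : 2 ∣ 2 ^ (m-k-1) := dvd_pow_self 2 (by omega)
          omega
        have hpos2 := Nat.two_pow_pos (m-k-1)
        simp; omega
  · -- p ≥ 2^m : everything false
    have hp2 : ¬ (2 ^ k + p < 2 ^ m) := by have := Nat.two_pow_pos k; omega
    simp [hp, hp2]

def pcount (x : Nat) : Nat := PySem.Int.bitCount (x : Int)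

theorem popNat_eq_pcount (n : Nat) : popNat n = pcount n := by
  induction n using Nat.strong_induction_on with
  | _ n IH =>
    rcases Nat.eq_zero_or_pos n with h | h
    · subst h
      rw [popNat]
      simp [pcount]
    · rw [popNat, if_neg (by omega), IH (n / 2) (by omega)]
      unfold pcount
      rw [PySem.Int.bitCount_natCast h]

theorem popNat_split (s : Nat) : ∀ (n : Nat), popNat n = popNat (n / 2 ^ s) + popNat (n % 2 ^ s) := by
  induction s with
  | zero =>
    intro n
    have h0 : popNat 0 = 0 := by rw [popNat]; simp
    rw [Nat.pow_zero, Nat.mod_one, Nat.div_one, h0]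
    omega
  | succ s IH =>
    intro n
    have hstep : ∀ m : Nat, popNat m = m % 2 + popNat (m / 2) := by
      intro m
      rcases Nat.eq_zero_or_pos m with h | h
      · subst h
        rw [popNat]
        simp
      · rw [popNat, if_neg (by omega)]
    have hps : (2:Nat) ^ (s+1) = 2 * 2 ^ s := by rw [pow_succ]; ring
    have hmod2 : n % 2 ^ (s+1) % 2 = n % 2 := Nat.mod_mod_of_dvd n (dvd_pow_self 2 s.succ_ne_zero)
    have hhalf : n % 2 ^ (s+1) / 2 = n / 2 % 2 ^ s := by
      rw [hps, Nat.mod_mul_right_div_self]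
    have hdd : n / 2 ^ (s+1) = n / 2 / 2 ^ s := by
      rw [hps, ← Nat.div_div_eq_div_mul]
    rw [hstep n, IH (n / 2), hstep (n % 2 ^ (s+1)), hmod2, hhalf, hdd]
    omega

theorem pyBitCount_eq_pcount : ∀ (k n : Nat), n < 2 ^ 2 ^ k → pyBitCount k n = pcount n := by
  intro k
  induction k with
  | zero => intro n _; rw [pyBitCount, popNat_eq_pcount]
  | succ k IH =>
    intro n hn
    rw [pyBitCount]
    by_cases h0 : n = 0
    · subst h0
      rw [if_pos rfl, ← popNat_eq_pcount, popNat]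
      simp
    · rw [if_neg h0]
      by_cases h6 : k + 1 ≤ 6
      · rw [if_pos h6, popNat_eq_pcount]
      · rw [if_neg h6]
        have hdb : (2:Nat) ^ 2 ^ (k+1) = 2 ^ 2 ^ k * 2 ^ 2 ^ k := by
          rw [← pow_add]
          congr 1
          rw [pow_succ]
          ring
        have hlo : n % 2 ^ 2 ^ k < 2 ^ 2 ^ k := Nat.mod_lt _ (Nat.two_pow_pos _)
        have hhi : n / 2 ^ 2 ^ k < 2 ^ 2 ^ k := by
          apply Nat.div_lt_iff_lt_mul (Nat.two_pow_pos _) |>.mpr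
          rw [← hdb]
          exact hn
        rw [IH _ hhi, IH _ hlo, ← popNat_eq_pcount, ← popNat_eq_pcount, ← popNat_eq_pcount,
            ← popNat_split]

def parAux (d j i : Nat) : Bool :=
  if d = 0 then false
  else ((decide (d % 2 = 1)) && (j.testBit i)) ^^ parAux (d / 2) (j + 1) i
termination_by d
decreasing_by omega

theorem pcount_zero : pcount 0 = 0 := by decide

theorem pcount_rec (x : Nat) (hx : 0 < x) : pcount x = x % 2 + pcount (x / 2) := by
  unfold pcount
  exact PySem.Int.bitCount_natCast hx

theorem parity_pcount (x : Nat) :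
    decide (pcount x % 2 = 1) = (decide (x % 2 = 1) ^^ decide (pcount (x / 2) % 2 = 1)) := by
  rcases Nat.eq_zero_or_pos x with h | h
  · subst h; simp [pcount_zero]
  · rw [pcount_rec x h]
    by_cases h1 : x % 2 = 1 <;> by_cases h2 : pcount (x/2) % 2 = 1 <;>
      simp [h1, h2] <;> omega

theorem land_div_two (a b : Nat) : (a &&& b) / 2 = a / 2 &&& b / 2 := by
  apply Nat.eq_of_testBit_eq
  intro i
  rw [← Nat.testBit_succ, Nat.testBit_land, Nat.testBit_succ, Nat.testBit_succ,
      ← Nat.testBit_land]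

theorem land_mod_two (a b : Nat) :
    decide ((a &&& b) % 2 = 1) = (decide (a % 2 = 1) && decide (b % 2 = 1)) := by
  rw [← Nat.testBit_zero, ← Nat.testBit_zero, ← Nat.testBit_zero, Nat.testBit_land]

theorem parity_land_parAux (d : Nat) : ∀ (M j i : Nat),
    (∀ q, d.testBit q = true → M.testBit q = (j + q).testBit i) →
    decide (pcount (d &&& M) % 2 = 1) = parAux d j i := by
  induction d using Nat.strong_induction_on with
  | _ d IH =>
    intro M j i hM
    rcases Nat.eq_zero_or_pos d with h | h
    · subst h; rw [parAux]; simp [pcount_zero]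
    · rw [parAux, if_neg (by omega), parity_pcount, land_mod_two, land_div_two]
      congr 1
      · -- head bits
        by_cases h1 : d % 2 = 1
        · have := hM 0 (by rw [Nat.testBit_zero]; simp [h1])
          rw [Nat.add_zero] at this
          rw [← Nat.testBit_zero M, this]
        · simp [h1]
      · apply IH (d / 2) (by omega)
        intro q hq
        rw [← Nat.testBit_succ] at hq ⊢
        rw [hM (q+1) hq]
        congr 1
        omega

theorem altLoop_testBit (d : Nat) : ∀ (j pos i : Nat),
    (hammingAltLoop d j pos).testBit i = (pos.testBit i ^^ parAux d j i) := by
  induction d using Nat.strong_induction_on with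
  | _ d IH =>
    intro j pos i
    rcases Nat.eq_zero_or_pos d with h | h
    · subst h; rw [hammingAltLoop, parAux]; simp
    · have hd0 : ¬ d = 0 := by omega
      rw [hammingAltLoop, dif_neg hd0]
      have hs : d >>> 1 = d / 2 := by
        simp [Nat.shiftRight_eq_div_pow]
      rw [hs, Nat.and_one_is_mod, IH (d / 2) (by omega)]
      conv_rhs => rw [parAux]
      rw [if_neg hd0]
      by_cases h1 : d % 2 = 1
      · rw [if_pos h1]
        simp [h1, Nat.testBit_xor]
      · rw [if_neg h1]
        simp [h1]

-- xor-of-positions splits at any cut: low s bits with offset j, the rest with offset j+s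
theorem parAux_zero (j i : Nat) : parAux 0 j i = false := by
  rw [parAux]
  simp

-- one unfolding step of parAux, valid for every d (for d = 0 both sides are false)
theorem parAux_step (d j i : Nat) :
    parAux d j i = ((decide (d % 2 = 1) && j.testBit i) ^^ parAux (d / 2) (j + 1) i) := by
  rcases Nat.eq_zero_or_pos d with h | h
  · subst h
    rw [parAux_zero, Nat.zero_div, parAux_zero]
    simp
  · rw [parAux, if_neg (show ¬ d = 0 by omega)]

theorem parAux_split (s : Nat) : ∀ (d j i : Nat),
    parAux d j i = (parAux (d % 2 ^ s) j i ^^ parAux (d / 2 ^ s) (j + s) i) := by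
  induction s with
  | zero =>
    intro d j i
    rw [Nat.pow_zero, Nat.mod_one, Nat.div_one, Nat.add_zero, parAux_zero]
    simp
  | succ s IH =>
    intro d j i
    have hps : (2:Nat) ^ (s+1) = 2 * 2 ^ s := by rw [pow_succ]; ring
    have hmod2 : d % 2 ^ (s+1) % 2 = d % 2 := Nat.mod_mod_of_dvd d (dvd_pow_self 2 s.succ_ne_zero)
    have hhalf : d % 2 ^ (s+1) / 2 = d / 2 % 2 ^ s := by
      rw [hps, Nat.mod_mul_right_div_self]
    have hdd : d / 2 ^ (s+1) = d / 2 / 2 ^ s := by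
      rw [hps, ← Nat.div_div_eq_div_mul]
    have hj : j + 1 + s = j + (s + 1) := by omega
    rw [parAux_step d j i, IH (d / 2) (j + 1) i, hj]
    conv_rhs => rw [parAux_step (d % 2 ^ (s+1)) j i]
    rw [hmod2, hhalf, hdd, Bool.xor_assoc]

theorem outer_testBit (d : Nat) : ∀ (j pos i : Nat),
    (hammingOuter d j pos).testBit i = (pos.testBit i ^^ parAux d j i) := by
  induction d using Nat.strong_induction_on with
  | _ d IH =>
    intro j pos i
    rcases Nat.eq_zero_or_pos d with h | h
    · subst h; rw [hammingOuter, parAux]; simp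
    · have hd0 : ¬ d = 0 := by omega
      rw [hammingOuter, dif_neg hd0]
      have hs : d >>> 64 = d / 2 ^ 64 := Nat.shiftRight_eq_div_pow d 64
      have hlt : d / 2 ^ 64 < d := Nat.div_lt_self h (by norm_num)
      rw [hs, IH (d / 2 ^ 64) hlt, altLoop_testBit]
      rw [show (0xFFFFFFFFFFFFFFFF : Nat) = 2 ^ 64 - 1 by norm_num,
          Nat.and_two_pow_sub_one_eq_mod]
      rw [parAux_split 64 d j i, Bool.xor_assoc]

def aModel (d : Nat) : Nat → Nat × Nat → Nat × Nat
  | 0, st => st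
  | k+1, st =>
    let mask := st.1 ^^^ (st.1 >>> 2 ^ k)
    aModel d k (mask, st.2 ||| ((pcount (d &&& mask) % 2) <<< k))

theorem bit_shiftLeft_le_one (b k i : Nat) (hb : b ≤ 1) :
    (b <<< k).testBit i = (decide (i = k) && decide (b = 1)) := by
  rw [Nat.testBit_shiftLeft]
  interval_cases b
  · simp
  · have h1 : Nat.testBit 1 (i - k) = decide (0 = i - k) := by
      rw [show (1:Nat) = 2 ^ 0 by rfl, Nat.testBit_two_pow]
    rw [h1]
    by_cases h : i = k <;> by_cases h2 : k ≤ i <;> simp [h, h2] <;> omega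

theorem aModel_testBit (m d : Nat) (hd : d < 2 ^ 2 ^ m) : ∀ (k : Nat), k ≤ m →
    ∀ (msk pos : Nat),
    (∀ q, msk.testBit q = MaskP m k q) →
    (∀ i', i' < k → pos.testBit i' = false) →
    ∀ i, ((aModel d k (msk, pos)).2).testBit i
        = (pos.testBit i || (decide (i < k) && parAux d 0 i)) := by
  have hdq : ∀ q, d.testBit q = true → q < 2 ^ m := by
    intro q hq
    by_contra hcon
    have : d < 2 ^ q := lt_of_lt_of_le hd (Nat.pow_le_pow_right (by norm_num) (by omega))
    rw [Nat.testBit_lt_two_pow this] at hq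
    exact Bool.false_ne_true hq
  intro k
  induction k with
  | zero => intro _ msk pos _ _ i; simp [aModel]
  | succ k IH =>
    intro hk msk pos hmsk hpos i
    show ((aModel d k (msk ^^^ (msk >>> 2 ^ k),
        pos ||| ((pcount (d &&& (msk ^^^ (msk >>> 2 ^ k))) % 2) <<< k))).2).testBit i = _
    have hmsk' : ∀ q, (msk ^^^ (msk >>> 2 ^ k)).testBit q = MaskP m k q := by
      intro q
      rw [Nat.testBit_xor, Nat.testBit_shiftRight, hmsk, hmsk]
      exact maskP_step m k q (by omega)
    have hpi : pcount (d &&& (msk ^^^ (msk >>> 2 ^ k))) % 2 ≤ 1 :=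
      Nat.le_of_lt_succ (Nat.mod_lt _ (by norm_num))
    have hpos' : ∀ i', i' < k →
        (pos ||| ((pcount (d &&& (msk ^^^ (msk >>> 2 ^ k))) % 2) <<< k)).testBit i' = false := by
      intro i' hi'
      rw [Nat.testBit_lor, hpos i' (by omega), bit_shiftLeft_le_one _ _ _ hpi]
      simp [show i' ≠ k by omega]
    rw [IH (by omega) _ _ hmsk' hpos' i]
    have hbridge : decide (pcount (d &&& (msk ^^^ (msk >>> 2 ^ k))) % 2 = 1) = parAux d 0 k := by
      apply parity_land_parAux
      intro q hq
      rw [hmsk' q]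
      unfold MaskP
      have h1 : q < 2 ^ m := hdq q hq
      simp [h1, show k ≠ m by omega]
    rw [Nat.testBit_lor, bit_shiftLeft_le_one _ _ _ hpi, hbridge]
    by_cases h1 : i < k
    · simp [h1, show i ≠ k by omega, show i < k + 1 by omega]
    · by_cases h2 : i = k
      · subst h2
        rw [hpos i (by omega)]
        simp
      · simp [h1, h2, show ¬ (i < k + 1) by omega]

theorem loops_eq (m d : Nat) (hd : d < 2 ^ 2 ^ m) :
    (aModel d m (2 ^ 2 ^ m - 1, 0)).2 = hammingOuter d 0 0 := by
  apply Nat.eq_of_testBit_eq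
  intro i
  rw [outer_testBit]
  rw [aModel_testBit m d hd m le_rfl _ _
    (by intro q; rw [Nat.testBit_two_pow_sub_one]; unfold MaskP; simp)
    (by intro i' _; exact Nat.zero_testBit i') i]
  simp only [Nat.zero_testBit, Bool.false_or, Bool.false_xor]
  by_cases h : i < m
  · simp [h]
  · have hz : parAux d 0 i = false := by
      rw [← parity_land_parAux d 0 0 i ?_]
      · simp [pcount_zero]
      · intro q hq
        rw [Nat.zero_testBit]
        have hq2 : q < 2 ^ m := by
          by_contra hcon
          have : d < 2 ^ q := lt_of_lt_of_le hd (Nat.pow_le_pow_right (by norm_num) (by omega))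
          rw [Nat.testBit_lt_two_pow this] at hq
          exact Bool.false_ne_true hq
        have : (0 + q) < 2 ^ i := by
          have : (2:Nat) ^ m ≤ 2 ^ i := Nat.pow_le_pow_right (by norm_num) (by omega)
          omega
        exact (Nat.testBit_lt_two_pow this).symm
    simp [h, hz]

theorem foldA_model (m dN : Nat) (hdN : dN < 2 ^ 2 ^ m) : ∀ (k : Nat) (msk pos : Nat),
    (((List.range k).map (fun (j : Nat) => (j : Int))).reverse).foldl
      (hcStep m ((dN : Nat) : Int)) ((msk : Int), (pos : Int))
    = (((aModel dN k (msk, pos)).1 : Int), ((aModel dN k (msk, pos)).2 : Int)) := by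
  intro k
  induction k with
  | zero => intro msk pos; simp [aModel]
  | succ k IH =>
    intro msk pos
    rw [List.range_succ, List.map_append, List.reverse_append]
    simp only [List.map_cons, List.map_nil, List.reverse_cons, List.reverse_nil,
      List.nil_append, List.cons_append]
    rw [List.foldl_cons]
    have hcast : ∀ (a b : Nat), PySem.Int.band ((a : Nat) : Int) ((b : Nat) : Int) = ((a &&& b : Nat) : Int) :=
      fun a b => PySem.Int.band_natCast a b
    have hstep :
        hcStep m ((dN : Nat) : Int) ((msk : Int), (pos : Int)) ((k : Nat) : Int)
        = (((msk ^^^ (msk >>> 2 ^ k) : Nat) : Int),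
           ((pos ||| ((pcount (dN &&& (msk ^^^ (msk >>> 2 ^ k))) % 2) <<< k) : Nat) : Int)) := by
      unfold hcStep
      simp only [Int.toNat_natCast]
      have h1 : ((1 : Int) <<< k) = (((1 <<< k : Nat) : Nat) : Int) := rfl
      rw [h1, Int.toNat_natCast, Nat.one_shiftLeft]
      have h2 : ((msk : Nat) : Int) >>> (2 ^ k : Nat) = (((msk >>> 2 ^ k : Nat) : Nat) : Int) := rfl
      rw [h2, PySem.Int.bxor_natCast, hcast]
      rw [show (1 : Int) = (((1 : Nat) : Nat) : Int) by rfl]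
      rw [Int.natAbs_natCast]
      rw [pyBitCount_eq_pcount m (dN &&& (msk ^^^ msk >>> 2 ^ k))
            (lt_of_le_of_lt Nat.and_le_left hdN)]
      rw [PySem.Int.band_natCast, Nat.and_one_is_mod]
      rw [show ((((pcount (dN &&& (msk ^^^ msk >>> 2 ^ k)) % 2 : Nat) : Nat) : Int) <<< k)
            = ((((pcount (dN &&& (msk ^^^ msk >>> 2 ^ k)) % 2) <<< k : Nat) : Nat) : Int) by rfl]
      rw [PySem.Int.bor_natCast]
    rw [hstep]
    rw [IH (msk ^^^ msk >>> 2 ^ k) (pos ||| (pcount (dN &&& (msk ^^^ msk >>> 2 ^ k)) % 2) <<< k)]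
    rfl

theorem band_mask_bounds (a : Int) (M : Nat) :
    0 ≤ PySem.Int.band a ((M : Nat) : Int) ∧ PySem.Int.band a ((M : Nat) : Int) ≤ ((M : Nat) : Int) := by
  unfold PySem.Int.band
  split_ifs with h1 h2 h2
  · rw [Int.toNat_natCast]
    constructor
    · exact Int.natCast_nonneg _
    · exact_mod_cast Nat.and_le_right
  · exact absurd (Int.natCast_nonneg M) h2
  · rw [Int.toNat_natCast]
    constructor
    · exact Int.natCast_nonneg _
    · exact_mod_cast Nat.sub_le _ _
  · exact absurd (Int.natCast_nonneg M) h2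

theorem hamming_eq (data n : Int) : hamming_check data n = hamming_check_alt data n := by
  simp only [hamming_check, hamming_check_alt]
  set m : Nat := PySem.Int.bitLength (max (n - 1) 0) with hm
  have hn2 : ((1 : Int) <<< m).toNat = 2 ^ m := by
    rw [show ((1 : Int) <<< m) = (((1 <<< m : Nat) : Nat) : Int) from rfl, Int.toNat_natCast,
        Nat.one_shiftLeft]
  have hmask : ((1 : Int) <<< ((1 : Int) <<< m).toNat) - 1 = (((2 ^ 2 ^ m - 1 : Nat) : Nat) : Int) := by
    rw [hn2, show ((1 : Int) <<< (2 ^ m : Nat)) = (((1 <<< 2 ^ m : Nat) : Nat) : Int) from rfl,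
        Nat.one_shiftLeft]
    have h1 : (1 : Nat) ≤ 2 ^ 2 ^ m := Nat.one_le_two_pow
    push_cast [h1]
    ring
  rw [hmask]
  obtain ⟨hge, hle⟩ := band_mask_bounds data (2 ^ 2 ^ m - 1)
  have hdcast : PySem.Int.band data (((2 ^ 2 ^ m - 1 : Nat) : Nat) : Int)
      = (((PySem.Int.band data (((2 ^ 2 ^ m - 1 : Nat) : Nat) : Int)).toNat : Nat) : Int) :=
    (Int.toNat_of_nonneg hge).symm
  set dN : Nat := (PySem.Int.band data (((2 ^ 2 ^ m - 1 : Nat) : Nat) : Int)).toNat with hdN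
  have hdlt : dN < 2 ^ 2 ^ m := by
    have h2 : ((dN : Nat) : Int) ≤ (((2 ^ 2 ^ m - 1 : Nat) : Nat) : Int) := by
      rw [hdN, Int.toNat_of_nonneg hge]; exact hle
    have h3 : dN ≤ 2 ^ 2 ^ m - 1 := by exact_mod_cast h2
    have h4 := Nat.one_le_two_pow (n := 2 ^ m)
    omega
  rw [hdcast]
  rw [PySem.List.pyRange_zero_natCast m]
  rw [show (0 : Int) = ((0 : Nat) : Int) from rfl]
  rw [foldA_model m dN hdlt m (2 ^ 2 ^ m - 1) 0]
  rw [loops_eq m dN hdlt]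

-- ===== VERDICT (by name: the statement is the Claim_ definition above) =====
theorem hamming_check_spec : Claim_equal_hamming_check := by
  intro data n _
  unfold Spec_hamming_check
  exact hamming_eq data n
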